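-- pv_equiv track=rewrite | github.com/EchEdward/Vive | Kat_lists.py | Zpz
-- ===== SOURCE A (Python) =====
-- def Zpz(M,a,b):
--     mi=M[0][a][b]
--     c=0
--     for i in range(1,len(M)):
--         if mi > M[i][a][b]:
--             mi=M[i][a][b]
--             c=i
--     return c
-- ===== SOURCE B (Python) =====
-- def Zpz(M, a, b):
--     order = sorted(range(len(M)), key=lambda i: M[i][a][b])
--     return order[0]
-- ===== Notes on version B (the rewrite author's own statement) =====
-- stated objective: alternative
-- what changed: B sorts the list of row indices by the projected value M[i][a][b] with Python's stable sort and returns the first index of the sorted order, instead of A's single-pass scan tracking a running minimum and its position; stability of the sort gives the same first-minimum tie-breaking.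
import Mathlib
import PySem

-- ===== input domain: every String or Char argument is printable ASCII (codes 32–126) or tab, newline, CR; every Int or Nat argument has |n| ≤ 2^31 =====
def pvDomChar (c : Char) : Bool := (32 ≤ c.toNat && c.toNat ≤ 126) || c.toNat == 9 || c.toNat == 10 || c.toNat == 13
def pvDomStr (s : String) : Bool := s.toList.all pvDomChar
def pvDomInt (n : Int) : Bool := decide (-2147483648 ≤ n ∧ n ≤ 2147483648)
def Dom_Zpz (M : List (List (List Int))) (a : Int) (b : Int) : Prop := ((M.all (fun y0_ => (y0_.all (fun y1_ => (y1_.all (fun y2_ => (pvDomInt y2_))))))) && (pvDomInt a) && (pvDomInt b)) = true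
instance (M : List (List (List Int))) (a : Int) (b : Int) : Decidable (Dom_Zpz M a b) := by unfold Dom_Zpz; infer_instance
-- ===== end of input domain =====

-- B sorts the index list by the projected value (stable) and returns the head, instead of A's running-minimum scan; same return value on Pre_.

-- ===== PORT A =====
-- A: running minimum mi and its index c over i in range(1, len(M))
def Zpz (M : List (List (List Int))) (a : Int) (b : Int) : Int :=
  let mi : Int := PySem.List.pyGetD (PySem.List.pyGetD (PySem.List.pyGetD M 0 []) a []) b 0
  ((PySem.List.pyRange 1 (M.length : Int) 1).foldl
    (fun (s : Int × Int) (i : Int) =>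
      if s.1 > PySem.List.pyGetD (PySem.List.pyGetD (PySem.List.pyGetD M i []) a []) b 0
      then (PySem.List.pyGetD (PySem.List.pyGetD (PySem.List.pyGetD M i []) a []) b 0, i)
      else s)
    (mi, 0)).2

-- ===== PORT B =====
-- B: order = sorted(range(len(M)), key=lambda i: M[i][a][b]); return order[0]
def Zpz_alt (M : List (List (List Int))) (a : Int) (b : Int) : Int :=
  let order : List Int :=
    PySem.List.sorted (PySem.List.pyRange 0 (M.length : Int) 1)
      (fun i => PySem.List.pyGetD (PySem.List.pyGetD (PySem.List.pyGetD M i []) a []) b 0)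
  PySem.List.pyGetD order 0 0

-- ===== PRECONDITION & SPEC =====
-- Pre_ excludes exactly the inputs where Python A raises: empty M (IndexError on M[0]) and
-- any row where row[a][b] is out of range (IndexError); B raises on those inputs too.
def Pre_Zpz (M : List (List (List Int))) (a : Int) (b : Int) : Prop :=
  M ≠ [] ∧ ∀ row ∈ M, ((PySem.List.pyGet? row a).bind (fun r => PySem.List.pyGet? r b)).isSome
instance (M : List (List (List Int))) (a : Int) (b : Int) : Decidable (Pre_Zpz M a b) := by unfold Pre_Zpz; infer_instance
def pvWitness_Zpz : List (List (List Int)) × Int × Int := ([[[3]], [[1]], [[2]]], 0, 0)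

def Spec_Zpz (M : List (List (List Int))) (a : Int) (b : Int) (out : Int) : Prop := out = Zpz_alt M a b
instance (M : List (List (List Int))) (a : Int) (b : Int) (out : Int) : Decidable (Spec_Zpz M a b out) := by unfold Spec_Zpz; infer_instance

-- ===== CLAIM (what is proved, stated in full; the proofs are below) =====
def Claim_equal_Zpz : Prop := ∀ (M : List (List (List Int))) (a : Int) (b : Int), Dom_Zpz M a b → Pre_Zpz M a b → Spec_Zpz M a b (Zpz M a b)

-- ===== LEMMAS AND PROOFS =====

-- head of an insertBy step: the new element goes to the front iff its key beats the current head's key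
lemma head_insertBy (k : Int → Int) (x h : Int) (t : List Int) :
    PySem.List.insertBy (fun a b => decide (k a < k b)) x (h :: t)
      = if k x < k h then x :: h :: t
        else h :: PySem.List.insertBy (fun a b => decide (k a < k b)) x t := by
  simp [PySem.List.insertBy]

-- Invariant linking A's running (min, argmin) pair to the head of B's insertion-sort fold:
-- starting from a sorted accumulator with head h and A-state (k h, h), the final A-state's
-- index is the head of the final accumulator.
lemma inv_fold (k : Int → Int) (l : List Int) :
    ∀ (h : Int) (t : List Int),
    (l.foldl (fun (s : Int × Int) (i : Int) => if s.1 > k i then (k i, i) else s) (k h, h)).2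
      = ((l.foldl (fun acc i => PySem.List.insertBy (fun a b => decide (k a < k b)) i acc) (h :: t)).headD 0) := by
  induction l with
  | nil => intro h t; simp
  | cons x l ih =>
      intro h t
      simp only [List.foldl_cons, head_insertBy]
      by_cases hx : k h > k x
      · rw [if_pos hx, if_pos (by omega)]
        exact ih x (h :: t)
      · rw [if_neg hx, if_neg (by omega)]
        exact ih h _

-- ===== VERDICT (by name: the statement is the Claim_ definition above) =====
theorem Zpz_spec : Claim_equal_Zpz := by
  intro M a b _ hpre
  obtain ⟨hne, _⟩ := hpre
  unfold Spec_Zpz Zpz Zpz_alt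
  set k : Int → Int := fun i =>
    PySem.List.pyGetD (PySem.List.pyGetD (PySem.List.pyGetD M i []) a []) b 0 with hk
  have hlen : (0 : Int) < (M.length : Int) := by
    have : 0 < M.length := List.length_pos_of_ne_nil hne
    exact_mod_cast this
  have hrange : PySem.List.pyRange 0 (M.length : Int) 1
      = 0 :: PySem.List.pyRange 1 (M.length : Int) 1 := by
    simpa using PySem.List.pyRange_one_cons (a := 0) (b := (M.length : Int)) hlen
  have hsorted : PySem.List.sorted (PySem.List.pyRange 0 (M.length : Int) 1) k
      = (PySem.List.pyRange 1 (M.length : Int) 1).foldl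
          (fun acc i => PySem.List.insertBy (fun a b => decide (k a < k b)) i acc) [0] := by
    rw [PySem.List.sorted_eq_foldl_insertBy, hrange]
    rfl
  have hmi : PySem.List.pyGetD (PySem.List.pyGetD (PySem.List.pyGetD M 0 []) a []) b 0 = k 0 := rfl
  have hne' : PySem.List.sorted (PySem.List.pyRange 0 (M.length : Int) 1) k ≠ [] := by
    rw [Ne, PySem.List.sorted_eq_nil_iff, hrange]
    simp
  obtain ⟨m, t, hmt⟩ := List.exists_cons_of_ne_nil hne'
  have hget : PySem.List.pyGetD (PySem.List.sorted (PySem.List.pyRange 0 (M.length : Int) 1) k) 0 0 = m := by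
    rw [hmt]; exact PySem.List.pyGetD_zero_cons _ _ _
  simp only [hget, hmi]
  have := inv_fold k (PySem.List.pyRange 1 (M.length : Int) 1) 0 []
  rw [← hsorted, hmt] at this
  simpa using this
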